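-- pv_equiv track=rewrite | github.com/y1z/Analisis-De-Algorimos | Archivos De Referencia/lcs_bruteforce.py | compararSubsecuencias
-- ===== SOURCE A (Python) =====
-- def compararSubsecuencias(subsecuencias1,subsecuencias2) :
--     lcs = []
--     for i in range(0,len(subsecuencias1)):
--         for j in range(0,len(subsecuencias2)):
--             if subsecuencias1[i] == subsecuencias2[j]:
--                 if len(lcs) < len(subsecuencias1[i]):
--                     lcs = subsecuencias1[i]
--     return lcs
-- ===== SOURCE B (Python) =====
-- def compararSubsecuencias(subsecuencias1, subsecuencias2):
--     # Sort-then-scan: stable sort list 1 by length descending, then return the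
--     # first element common to list 2 (set membership); default [] like A.
--     comunes = {tuple(s) for s in subsecuencias2}
--     for s in sorted(subsecuencias1, key=len, reverse=True):
--         if tuple(s) in comunes:
--             return s
--     return []
-- ===== Notes on version B (the rewrite author's own statement) =====
-- stated objective: alternative
-- what changed: Replaces A's nested quadratic scan with running maximum by a stable length-descending sort of list 1 followed by an early-return scan for the first element contained in a set built from list 2; stability makes the earliest longest common element win, as in A.
import Mathlib
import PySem

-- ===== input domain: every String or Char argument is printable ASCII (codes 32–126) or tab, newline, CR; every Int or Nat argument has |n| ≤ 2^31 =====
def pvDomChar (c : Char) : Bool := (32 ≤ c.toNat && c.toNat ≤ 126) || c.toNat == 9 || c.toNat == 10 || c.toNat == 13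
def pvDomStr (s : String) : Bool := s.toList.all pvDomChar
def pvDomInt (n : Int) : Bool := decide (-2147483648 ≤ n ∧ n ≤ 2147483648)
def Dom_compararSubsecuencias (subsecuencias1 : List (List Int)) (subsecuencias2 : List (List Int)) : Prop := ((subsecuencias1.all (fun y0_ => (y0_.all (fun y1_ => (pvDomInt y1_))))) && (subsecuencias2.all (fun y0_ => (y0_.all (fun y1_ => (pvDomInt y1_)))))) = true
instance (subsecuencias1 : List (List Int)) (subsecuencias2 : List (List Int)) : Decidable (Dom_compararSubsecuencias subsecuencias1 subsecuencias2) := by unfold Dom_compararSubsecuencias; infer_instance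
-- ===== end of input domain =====

-- B replaces A's nested scan + running maximum by a stable length-descending sort of
-- list 1 followed by an early-return scan for the first element present in a set built
-- from list 2 (objective: alternative algorithm; same result by sort stability).

-- ===== PORT A =====
def compararSubsecuencias (subsecuencias1 : List (List Int)) (subsecuencias2 : List (List Int)) : List Int :=
  (PySem.List.pyRange 0 subsecuencias1.length 1).foldl (fun lcs i =>
    (PySem.List.pyRange 0 subsecuencias2.length 1).foldl (fun lcs j =>
      if PySem.List.pyGetD subsecuencias1 i [] = PySem.List.pyGetD subsecuencias2 j [] then
        if lcs.length < (PySem.List.pyGetD subsecuencias1 i []).length then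
          PySem.List.pyGetD subsecuencias1 i []
        else lcs
      else lcs) lcs) []

-- ===== PORT B =====
def compararSubsecuencias_alt (subsecuencias1 : List (List Int)) (subsecuencias2 : List (List Int)) : List Int :=
  let comunes : PySem.Set (List Int) := PySem.Set.ofList subsecuencias2
  match (PySem.List.sorted subsecuencias1 (fun s => s.length) true).find?
      (fun s => PySem.Set.contains comunes s) with
  | some s => s
  | none => []

-- ===== PRECONDITION & SPEC =====
def Spec_compararSubsecuencias (subsecuencias1 : List (List Int)) (subsecuencias2 : List (List Int)) (out : List Int) : Prop := out = compararSubsecuencias_alt subsecuencias1 subsecuencias2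
instance (subsecuencias1 : List (List Int)) (subsecuencias2 : List (List Int)) (out : List Int) : Decidable (Spec_compararSubsecuencias subsecuencias1 subsecuencias2 out) := by unfold Spec_compararSubsecuencias; infer_instance

-- ===== CLAIM (what is proved, stated in full; the proofs are below) =====
def Claim_equal_compararSubsecuencias : Prop := ∀ (subsecuencias1 : List (List Int)) (subsecuencias2 : List (List Int)), Dom_compararSubsecuencias subsecuencias1 subsecuencias2 → Spec_compararSubsecuencias subsecuencias1 subsecuencias2 (compararSubsecuencias subsecuencias1 subsecuencias2)

-- ===== LEMMAS AND PROOFS =====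

-- A's inner loop over subsecuencias2 amounts to a membership test plus a length test.
theorem pv_inner_eq (x : List Int) (s2 : List (List Int)) (lcs : List Int) :
    s2.foldl (fun lcs y =>
      if x = y then (if lcs.length < x.length then x else lcs) else lcs) lcs
    = if x ∈ s2 ∧ lcs.length < x.length then x else lcs := by
  induction s2 generalizing lcs with
  | nil => simp
  | cons y t ih =>
    simp only [List.foldl_cons, List.mem_cons]
    by_cases hxy : x = y
    · subst hxy
      by_cases hl : lcs.length < x.length
      · rw [if_pos rfl, if_pos hl, ih]
        by_cases hm : x ∈ t <;> simp [hm, hl]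
      · rw [if_pos rfl, if_neg hl, ih]
        simp [hl]
    · rw [if_neg hxy, ih]
      simp [hxy]

-- One insertion step of B's stable descending insertion sort preserves the descending
-- order and the "first common element (default []) = A's running lcs" relation.
theorem pv_step (p : List Int → Bool) (x : List Int) (acc : List (List Int)) (lcs : List Int)
    (hs : acc.Pairwise (fun a b => b.length ≤ a.length))
    (hrel : ((acc.find? p).getD []) = lcs) :
    (PySem.List.insertBy (fun a b => decide (b.length < a.length)) x acc).Pairwise
      (fun a b => b.length ≤ a.length) ∧
    (((PySem.List.insertBy (fun a b => decide (b.length < a.length)) x acc).find? p).getD [])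
      = (if p x = true ∧ lcs.length < x.length then x else lcs) := by
  induction acc generalizing lcs with
  | nil =>
    simp only [List.find?_nil, Option.getD_none] at hrel
    subst hrel
    constructor
    · simp [PySem.List.insertBy]
    · simp only [PySem.List.insertBy]
      cases hpx : p x with
      | true =>
        simp only [List.find?_cons, hpx, Option.getD_some]
        by_cases hx : (0 : Nat) < x.length
        · simp [hx]
        · have : x = [] := by
            have := List.eq_nil_of_length_eq_zero (Nat.eq_zero_of_not_pos hx)
            exact this
          simp [this]
      | false => simp [hpx]
  | cons y t ih =>
    rw [List.pairwise_cons] at hs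
    obtain ⟨hy, ht⟩ := hs
    simp only [PySem.List.insertBy]
    by_cases hc : y.length < x.length
    · rw [if_pos (by simpa using hc)]
      constructor
      · rw [List.pairwise_cons]
        refine ⟨?_, by rw [List.pairwise_cons]; exact ⟨hy, ht⟩⟩
        intro z hz
        rcases List.mem_cons.mp hz with h | h
        · exact h ▸ Nat.le_of_lt hc
        · exact Nat.le_trans (hy z h) (Nat.le_of_lt hc)
      · cases hpx : p x with
        | true =>
          simp only [List.find?_cons, hpx, Option.getD_some]
          have hlt : lcs.length < x.length := by
            cases hf : (y :: t).find? p with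
            | none =>
              rw [hf] at hrel; simp at hrel; subst hrel
              exact Nat.lt_of_le_of_lt (Nat.zero_le _) hc
            | some r =>
              rw [hf] at hrel; simp at hrel; subst hrel
              have hrm := List.mem_of_find?_eq_some hf
              rcases List.mem_cons.mp hrm with h | h
              · exact h ▸ hc
              · exact Nat.lt_of_le_of_lt (hy _ h) hc
          simp [hlt]
        | false =>
          rw [List.find?_cons_of_neg (by simp [hpx]), hrel]
          simp
    · rw [if_neg (by simpa using hc)]
      have hxle : x.length ≤ y.length := Nat.le_of_not_lt hc
      cases hpy : p y with
      | true =>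
        have hlcs : y = lcs := by
          rw [List.find?_cons, hpy] at hrel; simpa using hrel
        subst hlcs
        constructor
        · rw [List.pairwise_cons]
          refine ⟨?_, (ih ((t.find? p).getD []) ht rfl).1⟩
          intro z hz
          rcases (PySem.List.mem_insertBy _ x z t).mp hz with h | h
          · exact h ▸ hxle
          · exact hy z h
        · simp only [List.find?_cons, hpy, Option.getD_some]
          simp [Nat.not_lt.mpr hxle]
      | false =>
        have hrel' : ((t.find? p).getD []) = lcs := by
          rw [List.find?_cons, hpy] at hrel; exact hrel
        obtain ⟨ihp, ihf⟩ := ih lcs ht hrel'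
        constructor
        · rw [List.pairwise_cons]
          refine ⟨?_, ihp⟩
          intro z hz
          rcases (PySem.List.mem_insertBy _ x z t).mp hz with h | h
          · exact h ▸ hxle
          · exact hy z h
        · simp only [List.find?_cons, hpy]
          exact ihf

-- Folding B's insertion over a list keeps the relation with A's running-max fold.
theorem pv_fold (p : List Int → Bool) (l : List (List Int)) :
    ∀ (lcs : List Int) (acc : List (List Int)),
      acc.Pairwise (fun a b => b.length ≤ a.length) →
      ((acc.find? p).getD []) = lcs →
      (((l.foldl (fun acc x => PySem.List.insertBy (fun a b => decide (b.length < a.length)) x acc) acc).find? p).getD [])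
        = l.foldl (fun lcs x => if p x = true ∧ lcs.length < x.length then x else lcs) lcs := by
  induction l with
  | nil => intro lcs acc _ hrel; simpa using hrel
  | cons x t ih =>
    intro lcs acc hs hrel
    obtain ⟨hp, hf⟩ := pv_step p x acc lcs hs hrel
    simpa using ih _ _ hp hf

-- ===== VERDICT (by name: the statement is the Claim_ definition above) =====
theorem compararSubsecuencias_spec : Claim_equal_compararSubsecuencias := by
  intro s1 s2 _
  unfold Spec_compararSubsecuencias compararSubsecuencias compararSubsecuencias_alt
  rw [PySem.List.foldl_pyRange_zero_pyGetD' s1 []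
    (fun lcs x => (PySem.List.pyRange 0 s2.length 1).foldl (fun lcs j =>
      if x = PySem.List.pyGetD s2 j [] then
        (if lcs.length < x.length then x else lcs) else lcs) lcs) []]
  have hA : s1.foldl (fun lcs x => (PySem.List.pyRange 0 s2.length 1).foldl (fun lcs j =>
      if x = PySem.List.pyGetD s2 j [] then
        (if lcs.length < x.length then x else lcs) else lcs) lcs) []
      = s1.foldl (fun lcs x =>
          if (PySem.Set.contains (PySem.Set.ofList s2) x) = true ∧ lcs.length < x.length
          then x else lcs) [] := by
    refine PySem.List.foldl_congr_mem s1 _ _ [] (fun lcs x _ => ?_)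
    rw [PySem.List.foldl_pyRange_zero_pyGetD' s2 []
      (fun lcs y => if x = y then (if lcs.length < x.length then x else lcs) else lcs) lcs]
    rw [pv_inner_eq]
    by_cases hm : x ∈ s2 <;> by_cases hl : lcs.length < x.length <;>
      simp [hm, hl]
  rw [hA]
  rw [show (match (PySem.List.sorted s1 (fun s => s.length) true).find?
        (fun s => PySem.Set.contains (PySem.Set.ofList s2) s) with
      | some s => s
      | none => []) =
      (((PySem.List.sorted s1 (fun s => s.length) true).find?
        (fun s => PySem.Set.contains (PySem.Set.ofList s2) s)).getD []) from by
    cases (PySem.List.sorted s1 (fun s => s.length) true).find?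
        (fun s => PySem.Set.contains (PySem.Set.ofList s2) s) <;> rfl]
  rw [PySem.List.sorted_rev_eq_foldl_insertBy s1 (fun s => s.length)]
  exact (pv_fold (fun s => PySem.Set.contains (PySem.Set.ofList s2) s) s1 [] []
    (by simp) (by simp)).symm
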